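-- pv_equiv track=rewrite | github.com/sarthakk21/CS335-Compiler-Design | Milestone/milestone3/tests/testcase4.py | function7
-- ===== SOURCE A (Python) =====
-- def function7(x: int) -> int:
--     result5: int = 0
--     i: int = 0
--     for i in range(x):
--         result5 += i
--         if i == 3:
--             break
--     return result5
-- ===== SOURCE B (Python) =====
-- def function7(x: int) -> int:
--     # closed form: the loop sums 0..min(x,4)-1 (break after adding 3)
--     n = min(max(x, 0), 4)
--     return n * (n - 1) // 2
-- ===== Notes on version B (the rewrite author's own statement) =====
-- stated objective: simpler
-- what changed: Replaced the break-capped summation loop by the triangular-number closed form on the clamped count n = min(max(x,0),4).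
import Mathlib
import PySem

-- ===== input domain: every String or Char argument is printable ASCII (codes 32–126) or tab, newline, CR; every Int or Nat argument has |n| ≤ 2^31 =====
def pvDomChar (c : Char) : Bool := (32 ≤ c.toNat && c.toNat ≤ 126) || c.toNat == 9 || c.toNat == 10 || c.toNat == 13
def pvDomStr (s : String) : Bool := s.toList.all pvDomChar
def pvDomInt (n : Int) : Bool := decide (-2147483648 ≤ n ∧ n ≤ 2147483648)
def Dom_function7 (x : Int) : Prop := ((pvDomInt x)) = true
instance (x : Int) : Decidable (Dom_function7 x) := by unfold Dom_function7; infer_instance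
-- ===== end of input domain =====

-- B replaces the break-capped summation loop by the triangular-number closed form on the clamped count (simpler).
-- ===== PORT A =====
def function7Loop : List Int → Int → Int
  | [], result5 => result5
  | i :: rest, result5 =>
    let result5 := result5 + i
    if i = 3 then result5 else function7Loop rest result5

def function7 (x : Int) : Int :=
  function7Loop (PySem.List.pyRange 0 x 1) 0

-- ===== PORT B =====
def function7_alt (x : Int) : Int :=
  let n := min (max x 0) 4
  PySem.Int.floordiv (n * (n - 1)) 2

-- ===== PRECONDITION & SPEC =====
def Spec_function7 (x : Int) (out : Int) : Prop := out = function7_alt x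
instance (x : Int) (out : Int) : Decidable (Spec_function7 x out) := by unfold Spec_function7; infer_instance

-- ===== CLAIM (what is proved, stated in full; the proofs are below) =====
def Claim_equal_function7 : Prop := ∀ (x : Int), Dom_function7 x → Spec_function7 x (function7 x)

-- ===== LEMMAS AND PROOFS =====

-- ===== VERDICT (by name: the statement is the Claim_ definition above) =====
theorem function7_spec : Claim_equal_function7 := by
  intro x _
  unfold Spec_function7
  rcases le_or_gt x 0 with h0 | h0
  · rw [function7, PySem.List.pyRange_one_eq_nil h0]
    have hn : min (max x 0) 4 = 0 := by omega
    simp [function7_alt, hn, function7Loop]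
  · rcases lt_or_ge x 4 with h4 | h4
    · interval_cases x <;> decide
    · rw [function7,
        PySem.List.pyRange_one_append 0 4 x (by omega) h4]
      have h04 : PySem.List.pyRange 0 4 1 = [0, 1, 2, 3] := by decide
      rw [h04]
      show (6:Int) = function7_alt x
      have hn : min (max x 0) 4 = 4 := by omega
      simp [function7_alt, hn]
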